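-- pv_equiv track=rewrite | github.com/NIH-NCPI/summarize-fhir | summfhir/patient.py | GetProperExtension
-- ===== SOURCE A (Python) =====
-- def GetProperExtension(extensions, url):
--     """Work through the extensions looking for a matching URL. Return Text if """
--     """none match"""
--
--     text_option = {}
--     for ext in extensions:
--         if ext['url'] == url:
--             return ext
--         if ext['url'] == 'text':
--             text_option = ext
--     return text_option
-- ===== SOURCE B (Python) =====
-- def GetProperExtension(extensions, url):
--     """Two scans: first matching url wins; else the last 'text' extension; else {}."""
--     match = next((e for e in extensions if e['url'] == url), None)
--     if match is not None:
--         return match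
--     return next((e for e in reversed(extensions) if e['url'] == 'text'), {})
-- ===== Notes on version B (the rewrite author's own statement) =====
-- stated objective: idiomatic
-- what changed: Replaces the fused loop carrying a text_option accumulator with two idiomatic next() scans: find the first url match, else take the last 'text' extension from a reversed scan.
import Mathlib
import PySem

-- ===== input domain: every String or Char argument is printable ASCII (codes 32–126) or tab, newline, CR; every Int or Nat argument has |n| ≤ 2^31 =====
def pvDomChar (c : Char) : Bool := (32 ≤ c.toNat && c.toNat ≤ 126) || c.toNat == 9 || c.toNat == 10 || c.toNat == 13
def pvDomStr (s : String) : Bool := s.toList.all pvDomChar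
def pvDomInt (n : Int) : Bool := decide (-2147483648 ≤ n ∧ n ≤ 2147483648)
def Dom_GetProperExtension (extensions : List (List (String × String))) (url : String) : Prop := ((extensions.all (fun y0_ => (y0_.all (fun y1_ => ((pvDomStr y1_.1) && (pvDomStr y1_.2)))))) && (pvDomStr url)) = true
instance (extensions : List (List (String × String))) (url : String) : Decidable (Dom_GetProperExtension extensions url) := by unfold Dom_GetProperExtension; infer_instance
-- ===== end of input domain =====

-- B replaces A's fused loop (text_option accumulator) with two scans: first url match, else last 'text' extension (idiomatic).


-- ===== PORT A =====
-- A's loop: early return on url match, keep overwriting text_option on 'text'.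
-- ext['url'] raises KeyError when the key is missing (excluded by Pre_); the port returns [] there.
def goA (extensions : List (List (String × String))) (url : String) (textOption : List (String × String)) : List (String × String) :=
  match extensions with
  | [] => textOption
  | e :: rest =>
    match e.lookup "url" with
    | none => []  -- KeyError in Python; outside Pre_
    | some u =>
      if u = url then e
      else if u = "text" then goA rest url e
      else goA rest url textOption

def GetProperExtension (extensions : List (List (String × String))) (url : String) : List (String × String) :=
  goA extensions url []

-- ===== PORT B =====
-- first scan: first extension whose 'url' equals url
def findMatch (extensions : List (List (String × String))) (url : String) : Option (List (String × String)) :=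
  match extensions with
  | [] => none
  | e :: rest =>
    match e.lookup "url" with
    | none => some []  -- KeyError in Python; outside Pre_
    | some u => if u = url then some e else findMatch rest url

-- second scan (over the reversed list): first extension whose 'url' is "text"
def findText (extensions : List (List (String × String))) : Option (List (String × String)) :=
  match extensions with
  | [] => none
  | e :: rest =>
    match e.lookup "url" with
    | none => some []  -- KeyError in Python; outside Pre_
    | some u => if u = "text" then some e else findText rest

def GetProperExtension_alt (extensions : List (List (String × String))) (url : String) : List (String × String) :=
  match findMatch extensions url with
  | some e => e
  | none => (findText extensions.reverse).getD []

-- ===== PRECONDITION & SPEC =====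
-- Pre_ excludes exactly the inputs where Python A raises KeyError: an extension visited
-- before (any) first url match lacks the 'url' key.
def Pre_GetProperExtension (extensions : List (List (String × String))) (url : String) : Prop :=
  ∀ e ∈ extensions.takeWhile (fun e => e.lookup "url" != some url), (e.lookup "url").isSome
instance (extensions : List (List (String × String))) (url : String) : Decidable (Pre_GetProperExtension extensions url) := by unfold Pre_GetProperExtension; infer_instance

def pvWitness_GetProperExtension : (List (List (String × String))) × String :=
  ([[("url", "text"), ("v", "1")], [("url", "a")]], "x")

def Spec_GetProperExtension (extensions : List (List (String × String))) (url : String) (out : List (String × String)) : Prop := out = GetProperExtension_alt extensions url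
instance (extensions : List (List (String × String))) (url : String) (out : List (String × String)) : Decidable (Spec_GetProperExtension extensions url out) := by unfold Spec_GetProperExtension; infer_instance

-- ===== CLAIM (what is proved, stated in full; the proofs are below) =====
def Claim_equal_GetProperExtension : Prop := ∀ (extensions : List (List (String × String))) (url : String), Dom_GetProperExtension extensions url → Pre_GetProperExtension extensions url → Spec_GetProperExtension extensions url (GetProperExtension extensions url)

-- ===== LEMMAS AND PROOFS =====

theorem findText_append (xs ys : List (List (String × String))) :
    findText (xs ++ ys) = (findText xs).or (findText ys) := by
  induction xs with
  | nil => simp [findText]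
  | cons e rest ih =>
    simp only [List.cons_append, findText]
    cases e.lookup "url" with
    | none => simp
    | some u =>
      by_cases hu : u = "text" <;> simp [hu, ih]

-- main invariant: under Pre_, A's loop from accumulator t equals B's two-scan result with t as default
theorem goA_eq (extensions : List (List (String × String))) (url : String) :
    ∀ t, Pre_GetProperExtension extensions url →
      goA extensions url t =
        (match findMatch extensions url with
         | some e => e
         | none => (findText extensions.reverse).getD t) := by
  induction extensions with
  | nil => intro t _; simp [goA, findMatch, findText]
  | cons e rest ih =>
    intro t hpre
    cases hl : e.lookup "url" with
    | none =>
      exfalso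
      have hb : ((none : Option String) != some url) = true := by simp
      have hmem : e ∈ (e :: rest).takeWhile (fun e => e.lookup "url" != some url) := by
        simp [List.takeWhile, hl, hb]
      have := hpre e hmem
      simp [hl] at this
    | some u =>
      by_cases hu : u = url
      · simp [goA, findMatch, hl, hu]
      · have hpre' : Pre_GetProperExtension rest url := by
          intro x hx
          apply hpre
          have htw : (e :: rest).takeWhile (fun e => e.lookup "url" != some url)
              = e :: rest.takeWhile (fun e => e.lookup "url" != some url) := by
            have hb : ((some u != some url) : Bool) = true := by simp [hu]
            simp [List.takeWhile, hl, hb]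
          rw [htw]; exact List.mem_cons_of_mem _ hx
        have hrev : (e :: rest).reverse = rest.reverse ++ [e] := by simp
        by_cases ht : u = "text"
        · simp only [goA, findMatch, hl, if_neg hu, if_pos ht, ih e hpre', hrev,
            findText_append]
          cases findMatch rest url with
          | some x => rfl
          | none =>
            simp only []
            cases hft : findText rest.reverse with
            | some x => simp [Option.or]
            | none => simp [Option.or, findText, hl, ht]
        · simp only [goA, findMatch, hl, if_neg hu, if_neg ht, ih t hpre', hrev,
            findText_append]
          cases findMatch rest url with
          | some x => rfl
          | none =>
            simp only []
            cases hft : findText rest.reverse with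
            | some x => simp [Option.or]
            | none => simp [Option.or, findText, hl, ht]

-- ===== VERDICT (by name: the statement is the Claim_ definition above) =====
theorem GetProperExtension_spec : Claim_equal_GetProperExtension := by
  intro extensions url _ hpre
  unfold Spec_GetProperExtension GetProperExtension GetProperExtension_alt
  exact goA_eq extensions url [] hpre
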